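-- pv_equiv track=rewrite | github.com/paiml/depyler | examples/hard_max_sum_submatrix.py | max_sum_rectangle
-- ===== SOURCE A (Python) =====
-- def max_sum_rectangle(matrix: list[list[int]], max_rows: int, max_cols: int) -> int:
--     """Return maximum sum of submatrix with at most max_rows rows and max_cols cols."""
--     rows: int = len(matrix)
--     if rows == 0:
--         return 0
--     cols: int = len(matrix[0])
--     if cols == 0:
--         return 0
--     prefix: list[list[int]] = []
--     i: int = 0
--     while i <= rows:
--         row: list[int] = []
--         j: int = 0
--         while j <= cols:
--             row.append(0)
--             j = j + 1
--         prefix.append(row)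
--         i = i + 1
--     i = 1
--     while i <= rows:
--         j: int = 1
--         while j <= cols:
--             prefix[i][j] = matrix[i - 1][j - 1] + prefix[i - 1][j] + prefix[i][j - 1] - prefix[i - 1][j - 1]
--             j = j + 1
--         i = i + 1
--     best: int = matrix[0][0]
--     r1: int = 1
--     while r1 <= rows:
--         c1: int = 1
--         while c1 <= cols:
--             r2: int = r1
--             while r2 <= rows and r2 - r1 + 1 <= max_rows:
--                 c2: int = c1
--                 while c2 <= cols and c2 - c1 + 1 <= max_cols:
--                     val: int = prefix[r2][c2] - prefix[r1 - 1][c2] - prefix[r2][c1 - 1] + prefix[r1 - 1][c1 - 1]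
--                     if val > best:
--                         best = val
--                     c2 = c2 + 1
--                 r2 = r2 + 1
--             c1 = c1 + 1
--         r1 = r1 + 1
--     return best
-- ===== SOURCE B (Python) =====
-- def max_sum_rectangle(matrix: list[list[int]], max_rows: int, max_cols: int) -> int:
--     """Return maximum sum of submatrix with at most max_rows rows and max_cols cols."""
--     rows = len(matrix)
--     if rows == 0:
--         return 0
--     cols = len(matrix[0])
--     if cols == 0:
--         return 0
--     best = matrix[0][0]
--     for top in range(rows):
--         strip = [0] * cols
--         for bot in range(top, min(rows, top + max_rows)):
--             row = matrix[bot]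
--             for j in range(cols):
--                 strip[j] += row[j]
--             for left in range(cols):
--                 run = 0
--                 for right in range(left, min(cols, left + max_cols)):
--                     run += strip[right]
--                     if run > best:
--                         best = run
--     return best
-- ===== Notes on version B (the rewrite author's own statement) =====
-- stated objective: faster
-- what changed: Replaced the (rows+1)x(cols+1) 2D prefix-sum table and 4-lookup inclusion-exclusion per rectangle by the standard strip technique: for each top row maintain running column sums of the strip, and scan each strip with a running segment sum, so no prefix table is built and each candidate rectangle costs one addition instead of four list indexings.
import Mathlib
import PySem

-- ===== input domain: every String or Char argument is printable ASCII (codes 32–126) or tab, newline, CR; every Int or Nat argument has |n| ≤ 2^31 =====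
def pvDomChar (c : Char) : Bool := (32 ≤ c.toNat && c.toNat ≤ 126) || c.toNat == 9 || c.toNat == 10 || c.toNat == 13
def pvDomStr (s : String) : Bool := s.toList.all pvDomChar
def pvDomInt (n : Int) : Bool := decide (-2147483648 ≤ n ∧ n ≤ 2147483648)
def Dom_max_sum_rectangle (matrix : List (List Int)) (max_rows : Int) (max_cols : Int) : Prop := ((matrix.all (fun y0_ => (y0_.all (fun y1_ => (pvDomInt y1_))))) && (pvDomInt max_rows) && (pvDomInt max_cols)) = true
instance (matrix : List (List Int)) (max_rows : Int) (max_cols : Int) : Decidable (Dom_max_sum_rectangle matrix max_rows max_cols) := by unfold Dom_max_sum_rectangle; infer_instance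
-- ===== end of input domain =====

-- B replaces A's 2D prefix-sum table (4 lookups per rectangle) by per-top-row running column-strip
-- sums plus a running segment sum — same exact result, measurably faster by constant factor.

-- ===== PORT A =====
-- prefix-table lookup prefix[i][j] (always in range when Python A does not raise)
def pvPG (p : List (List Int)) (i j : Nat) : Int := (p.getD i []).getD j 0

-- inner while of the zero-table build: while j <= cols: row.append(0)
def pvAzrow (cols : Nat) (j : Nat) (row : List Int) : List Int :=
  if j ≤ cols then pvAzrow cols (j + 1) (row ++ [0]) else row
  termination_by cols + 1 - j

-- outer while of the zero-table build: while i <= rows: prefix.append(row)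
def pvAzero (rows cols : Nat) (i : Nat) (p : List (List Int)) : List (List Int) :=
  if i ≤ rows then pvAzero rows cols (i + 1) (p ++ [pvAzrow cols 0 []]) else p
  termination_by rows + 1 - i

-- inner while of the fill: prefix[i][j] = matrix[i-1][j-1] + prefix[i-1][j] + prefix[i][j-1] - prefix[i-1][j-1]
def pvAfillJ (matrix : List (List Int)) (cols i : Nat) (j : Nat) (p : List (List Int)) : List (List Int) :=
  if j ≤ cols then
    let v := ((matrix.getD (i - 1) []).getD (j - 1) 0) + pvPG p (i - 1) j + pvPG p i (j - 1) - pvPG p (i - 1) (j - 1)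
    pvAfillJ matrix cols i (j + 1) (p.set i ((p.getD i []).set j v))
  else p
  termination_by cols + 1 - j

def pvAfillI (matrix : List (List Int)) (rows cols : Nat) (i : Nat) (p : List (List Int)) : List (List Int) :=
  if i ≤ rows then pvAfillI matrix rows cols (i + 1) (pvAfillJ matrix cols i 1 p) else p
  termination_by rows + 1 - i

-- innermost while: c2 scan
def pvAc2 (mc : Int) (cols : Nat) (p : List (List Int)) (r1 c1 r2 : Nat) (c2 : Nat) (best : Int) : Int :=
  if c2 ≤ cols ∧ (c2 : Int) - (c1 : Int) + 1 ≤ mc then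
    let val := pvPG p r2 c2 - pvPG p (r1 - 1) c2 - pvPG p r2 (c1 - 1) + pvPG p (r1 - 1) (c1 - 1)
    pvAc2 mc cols p r1 c1 r2 (c2 + 1) (if val > best then val else best)
  else best
  termination_by cols + 1 - c2

def pvAr2 (mr mc : Int) (rows cols : Nat) (p : List (List Int)) (r1 c1 : Nat) (r2 : Nat) (best : Int) : Int :=
  if r2 ≤ rows ∧ (r2 : Int) - (r1 : Int) + 1 ≤ mr then
    pvAr2 mr mc rows cols p r1 c1 (r2 + 1) (pvAc2 mc cols p r1 c1 r2 c1 best)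
  else best
  termination_by rows + 1 - r2

def pvAc1 (mr mc : Int) (rows cols : Nat) (p : List (List Int)) (r1 : Nat) (c1 : Nat) (best : Int) : Int :=
  if c1 ≤ cols then pvAc1 mr mc rows cols p r1 (c1 + 1) (pvAr2 mr mc rows cols p r1 c1 r1 best) else best
  termination_by cols + 1 - c1

def pvAr1 (mr mc : Int) (rows cols : Nat) (p : List (List Int)) (r1 : Nat) (best : Int) : Int :=
  if r1 ≤ rows then pvAr1 mr mc rows cols p (r1 + 1) (pvAc1 mr mc rows cols p r1 1 best) else best
  termination_by rows + 1 - r1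

def max_sum_rectangle (matrix : List (List Int)) (max_rows : Int) (max_cols : Int) : Int :=
  let rows := matrix.length
  if rows = 0 then 0 else
  let cols := (matrix.getD 0 []).length
  if cols = 0 then 0 else
  let p0 := pvAzero rows cols 0 []
  let p := pvAfillI matrix rows cols 1 p0
  pvAr1 max_rows max_cols rows cols p 1 ((matrix.getD 0 []).getD 0 0)

-- ===== PORT B =====
-- for j in range(cols): strip[j] += row[j]
def pvBadd (row : List Int) (cols : Nat) (strip : List Int) : List Int :=
  (List.range cols).foldl (fun s j => s.set j (s.getD j 0 + row.getD j 0)) strip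

-- for right in range(left, min(cols, left + max_cols)): run += strip[right]; best = max
-- range(a, b) is the Nat interval [a, max a b): List.range' a (b - a) with the Int bound clamped by toNat
def pvBrun (mc : Int) (cols : Nat) (strip : List Int) (left : Nat) (best : Int) : Int :=
  ((List.range' left ((min (cols : Int) ((left : Int) + mc) - (left : Int)).toNat)).foldl
    (fun (rb : Int × Int) right =>
      let run := rb.1 + strip.getD right 0
      (run, if run > rb.2 then run else rb.2)) ((0 : Int), best)).2

-- for left in range(cols): run = 0; ...
def pvBleft (mc : Int) (cols : Nat) (strip : List Int) (best : Int) : Int :=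
  (List.range cols).foldl (fun b left => pvBrun mc cols strip left b) best

-- for bot in range(top, min(rows, top + max_rows)): update strip; scan strip
def pvBbot (matrix : List (List Int)) (mr mc : Int) (rows cols : Nat) (top : Nat) (best : Int) : Int :=
  ((List.range' top ((min (rows : Int) ((top : Int) + mr) - (top : Int)).toNat)).foldl
    (fun (sb : List Int × Int) bot =>
      let strip := pvBadd (matrix.getD bot []) cols sb.1
      (strip, pvBleft mc cols strip sb.2)) (List.replicate cols 0, best)).2

def max_sum_rectangle_alt (matrix : List (List Int)) (max_rows : Int) (max_cols : Int) : Int :=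
  let rows := matrix.length
  if rows = 0 then 0 else
  let cols := (matrix.getD 0 []).length
  if cols = 0 then 0 else
  (List.range rows).foldl (fun b top => pvBbot matrix max_rows max_cols rows cols top b)
    ((matrix.getD 0 []).getD 0 0)

-- ===== PRECONDITION & SPEC =====
-- Pre_ excludes exactly the ragged matrices (a row shorter than the first row), on which
-- Python A's prefix-table fill raises IndexError.
def Pre_max_sum_rectangle (matrix : List (List Int)) (max_rows : Int) (max_cols : Int) : Prop :=
  ∀ row ∈ matrix, (matrix.headD []).length ≤ row.length
instance (matrix : List (List Int)) (max_rows : Int) (max_cols : Int) : Decidable (Pre_max_sum_rectangle matrix max_rows max_cols) := by unfold Pre_max_sum_rectangle; infer_instance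
def pvWitness_max_sum_rectangle : List (List Int) × Int × Int := ([[1, -2], [3, 4]], 2, 1)

def Spec_max_sum_rectangle (matrix : List (List Int)) (max_rows : Int) (max_cols : Int) (out : Int) : Prop := out = max_sum_rectangle_alt matrix max_rows max_cols
instance (matrix : List (List Int)) (max_rows : Int) (max_cols : Int) (out : Int) : Decidable (Spec_max_sum_rectangle matrix max_rows max_cols out) := by unfold Spec_max_sum_rectangle; infer_instance

-- ===== CLAIM (what is proved, stated in full; the proofs are below) =====
def Claim_equal_max_sum_rectangle : Prop := ∀ (matrix : List (List Int)) (max_rows : Int) (max_cols : Int), Dom_max_sum_rectangle matrix max_rows max_cols → Pre_max_sum_rectangle matrix max_rows max_cols → Spec_max_sum_rectangle matrix max_rows max_cols (max_sum_rectangle matrix max_rows max_cols)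

-- ===== LEMMAS AND PROOFS =====
def pvEnt (m : List (List Int)) (i j : Nat) : Int := (m.getD i []).getD j 0
def pvRect (m : List (List Int)) (t b l r : Nat) : Int :=
  ∑ i ∈ Finset.Ico t b, ∑ j ∈ Finset.Ico l r, pvEnt m i j
def pvPre (m : List (List Int)) (i j : Nat) : Int := pvRect m 0 i 0 j

lemma pvGetD_set_eq {α : Type} (l : List α) (i : Nat) (x d : α) (h : i < l.length) :
    (l.set i x).getD i d = x := by simp [List.getD, h]
lemma pvGetD_set_ne {α : Type} (l : List α) (i i' : Nat) (x d : α) (h : i' ≠ i) :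
    (l.set i x).getD i' d = l.getD i' d := by
  simp [List.getD, Ne.symm h]
lemma pvGetD_replicate {α : Type} (n i : Nat) (x d : α) :
    (List.replicate n x).getD i d = if i < n then x else d := by
  split <;> rename_i h <;> simp [List.getD, h]

lemma pvPre_zero_left (m : List (List Int)) (j : Nat) : pvPre m 0 j = 0 := by
  simp [pvPre, pvRect]
lemma pvPre_zero_right (m : List (List Int)) (i : Nat) : pvPre m i 0 = 0 := by
  simp [pvPre, pvRect]

lemma pvPre_succ_succ (m : List (List Int)) (i j : Nat) :
    pvPre m (i+1) (j+1) = pvEnt m i j + pvPre m i (j+1) + pvPre m (i+1) j - pvPre m i j := by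
  have h1 : pvPre m (i+1) (j+1) = pvPre m i (j+1) + ∑ j' ∈ Finset.Ico 0 (j+1), pvEnt m i j' := by
    simp [pvPre, pvRect, Finset.sum_range_succ]
  have h2 : pvPre m (i+1) j = pvPre m i j + ∑ j' ∈ Finset.Ico 0 j, pvEnt m i j' := by
    simp [pvPre, pvRect, Finset.sum_range_succ]
  have h3 : ∑ j' ∈ Finset.Ico 0 (j+1), pvEnt m i j' = (∑ j' ∈ Finset.Ico 0 j, pvEnt m i j') + pvEnt m i j :=
    Finset.sum_Ico_succ_top (Nat.zero_le j) _
  rw [h1, h2, h3]; ring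

lemma pvPre_sub (m : List (List Int)) (t b l r : Nat) (ht : t ≤ b) (hl : l ≤ r) :
    pvPre m b r - pvPre m t r - pvPre m b l + pvPre m t l = pvRect m t b l r := by
  simp only [pvPre, pvRect]
  rw [← Finset.sum_Ico_consecutive (fun i => ∑ j ∈ Finset.Ico 0 r, pvEnt m i j) (Nat.zero_le t) ht,
      ← Finset.sum_Ico_consecutive (fun i => ∑ j ∈ Finset.Ico 0 l, pvEnt m i j) (Nat.zero_le t) ht]
  have : ∀ i, ∑ j ∈ Finset.Ico 0 r, pvEnt m i j
      = (∑ j ∈ Finset.Ico 0 l, pvEnt m i j) + ∑ j ∈ Finset.Ico l r, pvEnt m i j := by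
    intro i; rw [Finset.sum_Ico_consecutive _ (Nat.zero_le l) hl]
  simp only [this, Finset.sum_add_distrib]
  ring

lemma pvAzrow_eq (cols j : Nat) (row : List Int) :
    pvAzrow cols j row = row ++ List.replicate (cols + 1 - j) 0 := by
  fun_induction pvAzrow with
  | case1 j row h ih =>
    rw [ih, show cols + 1 - j = (cols - j) + 1 by omega, List.replicate_succ, List.append_assoc]
    simp [show cols + 1 - (j + 1) = cols - j by omega]
  | case2 j row h =>
    rw [show cols + 1 - j = 0 by omega, List.replicate_zero, List.append_nil]

lemma pvAzero_eq (rows cols i : Nat) (p : List (List Int)) :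
    pvAzero rows cols i p = p ++ List.replicate (rows + 1 - i) (List.replicate (cols + 1) 0) := by
  fun_induction pvAzero with
  | case1 i p h ih =>
    rw [ih, pvAzrow_eq, show cols + 1 - 0 = cols + 1 by omega,
        show rows + 1 - i = (rows - i) + 1 by omega, List.replicate_succ, List.append_assoc]
    simp [List.replicate_succ]
  | case2 i p h =>
    rw [show rows + 1 - i = 0 by omega, List.replicate_zero, List.append_nil]

def pvInv (m : List (List Int)) (rows cols i j : Nat) (p : List (List Int)) : Prop :=
  p.length = rows + 1 ∧ (∀ i' ≤ rows, (p.getD i' []).length = cols + 1) ∧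
  ∀ i' j', i' ≤ rows → j' ≤ cols →
    pvPG p i' j' = if i' < i ∨ (i' = i ∧ j' < j) then pvPre m i' j' else 0

lemma pvAfillJ_inv (m : List (List Int)) (rows cols i j : Nat) (p : List (List Int))
    (h1 : 1 ≤ i) (hir : i ≤ rows) (hj : 1 ≤ j) (hinv : pvInv m rows cols i j p) :
    pvInv m rows cols (i + 1) 1 (pvAfillJ m cols i j p) := by
  revert hj hinv
  fun_induction pvAfillJ m cols i j p with
  | case1 j p h v ih =>
    intro hj hinv
    apply ih (by omega)
    obtain ⟨hlen, hlens, hval⟩ := hinv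
    have hip : i < p.length := by omega
    have hjr : j < ((p.getD i []).length) := by rw [hlens i hir]; omega
    have hv : ((m.getD (i - 1) []).getD (j - 1) 0) + pvPG p (i - 1) j + pvPG p i (j - 1)
        - pvPG p (i - 1) (j - 1) = pvPre m i j := by
      rw [hval (i-1) j (by omega) (by omega), hval i (j-1) (by omega) (by omega),
          hval (i-1) (j-1) (by omega) (by omega),
          if_pos (by omega), if_pos (by omega), if_pos (by omega)]
      have := pvPre_succ_succ m (i-1) (j-1)
      rw [show i - 1 + 1 = i by omega, show j - 1 + 1 = j by omega] at this
      rw [this]; unfold pvEnt; ring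
    refine ⟨by simpa using hlen, ?_, ?_⟩
    · intro i' hi'
      by_cases hii : i' = i
      · subst hii; rw [pvGetD_set_eq _ _ _ _ hip]; simpa using hlens i' hi'
      · rw [pvGetD_set_ne _ _ _ _ _ hii]; exact hlens i' hi'
    · intro i' j' hi' hj'
      by_cases hii : i' = i
      · unfold pvPG
        rw [hii, pvGetD_set_eq _ _ _ _ hip]
        by_cases hjj : j' = j
        · rw [hjj, pvGetD_set_eq _ _ _ _ hjr, if_pos (by omega)]
          exact hv
        · rw [pvGetD_set_ne _ _ _ _ _ hjj]
          have := hval i j' hir hj'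
          unfold pvPG at this
          rw [this]
          exact if_congr (by omega) rfl rfl
      · unfold pvPG
        rw [pvGetD_set_ne _ _ _ _ _ hii]
        have := hval i' j' hi' hj'
        unfold pvPG at this
        rw [this]
        exact if_congr (by omega) rfl rfl
  | case2 j p h =>
    intro hj hinv
    obtain ⟨hlen, hlens, hval⟩ := hinv
    refine ⟨hlen, hlens, ?_⟩
    intro i' j' hi' hj'
    rw [hval i' j' hi' hj']
    by_cases hc : i' < i ∨ (i' = i ∧ j' < j)
    · rw [if_pos hc, if_pos (by omega)]
    · by_cases hz : i' = i + 1 ∧ j' = 0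
      · rw [if_neg hc, if_pos (by omega), hz.2, pvPre_zero_right]
      · rw [if_neg hc, if_neg (by omega)]

lemma pvAfillI_inv (m : List (List Int)) (rows cols i : Nat) (p : List (List Int))
    (h1 : 1 ≤ i) (hinv : pvInv m rows cols i 1 p) :
    pvInv m rows cols (rows + 1) 1 (pvAfillI m rows cols i p) := by
  revert hinv
  fun_induction pvAfillI m rows cols i p with
  | case1 i p h ih =>
    intro hinv
    exact ih (by omega) (pvAfillJ_inv m rows cols i 1 p h1 h (by omega) hinv)
  | case2 i p h =>
    intro hinv
    obtain ⟨hlen, hlens, hval⟩ := hinv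
    refine ⟨hlen, hlens, ?_⟩
    intro i' j' hi' hj'
    rw [hval i' j' hi' hj']
    exact if_congr (by omega) rfl rfl

lemma pvTable (m : List (List Int)) (rows cols : Nat) (i j : Nat) (hi : i ≤ rows) (hj : j ≤ cols) :
    pvPG (pvAfillI m rows cols 1 (pvAzero rows cols 0 [])) i j = pvPre m i j := by
  have hinit : pvInv m rows cols 1 1 (pvAzero rows cols 0 []) := by
    rw [pvAzero_eq, show rows + 1 - 0 = rows + 1 by omega, List.nil_append]
    refine ⟨by simp, by intro i' hi'; rw [pvGetD_replicate, if_pos (by omega)]; simp, ?_⟩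
    intro i' j' hi' hj'
    unfold pvPG
    rw [pvGetD_replicate, if_pos (by omega), pvGetD_replicate, if_pos (by omega)]
    by_cases hc : i' < 1 ∨ (i' = 1 ∧ j' < 1)
    · rw [if_pos hc]
      rcases hc with hc | ⟨hc1, hc2⟩
      · rw [show i' = 0 by omega, pvPre_zero_left]
      · rw [show j' = 0 by omega, pvPre_zero_right]
    · rw [if_neg hc]
  have := (pvAfillI_inv m rows cols 1 _ (by omega) hinit).2.2 i j hi hj
  rw [this, if_pos (by omega)]

def pvValA (p : List (List Int)) (r1 c1 r2 c2 : Nat) : Int :=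
  pvPG p r2 c2 - pvPG p (r1 - 1) c2 - pvPG p r2 (c1 - 1) + pvPG p (r1 - 1) (c1 - 1)
def pvCntC (mc : Int) (cols c1 c2 : Nat) : Nat := (min ((cols : Int) + 1 - c2) ((c1 : Int) + mc - c2)).toNat
def pvCntR (mr : Int) (rows r1 r2 : Nat) : Nat := (min ((rows : Int) + 1 - r2) ((r1 : Int) + mr - r2)).toNat

lemma pvMaxf (b v : Int) : (if v > b then v else b) = max b v := by split <;> omega

lemma pvAc2_eq (mc : Int) (cols : Nat) (p : List (List Int)) (r1 c1 r2 c2 : Nat) (best : Int) :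
    pvAc2 mc cols p r1 c1 r2 c2 best
      = List.foldl max best ((List.range' c2 (pvCntC mc cols c1 c2)).map (pvValA p r1 c1 r2)) := by
  fun_induction pvAc2 mc cols p r1 c1 r2 c2 best with
  | case1 c2 best h val ih =>
    rw [show pvCntC mc cols c1 c2 = pvCntC mc cols c1 (c2 + 1) + 1 by unfold pvCntC; omega,
        List.range'_succ, List.map_cons, List.foldl_cons]
    rw [dite_eq_ite] at ih
    rw [ih, pvMaxf]
    rfl
  | case2 c2 best h =>
    rw [show pvCntC mc cols c1 c2 = 0 by unfold pvCntC; omega]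
    rfl

lemma pvAr2_eq (mr mc : Int) (rows cols : Nat) (p : List (List Int)) (r1 c1 r2 : Nat) (best : Int) :
    pvAr2 mr mc rows cols p r1 c1 r2 best
      = List.foldl max best ((List.range' r2 (pvCntR mr rows r1 r2)).flatMap
          (fun r2' => (List.range' c1 (pvCntC mc cols c1 c1)).map (pvValA p r1 c1 r2'))) := by
  fun_induction pvAr2 mr mc rows cols p r1 c1 r2 best with
  | case1 r2 best h ih =>
    rw [show pvCntR mr rows r1 r2 = pvCntR mr rows r1 (r2 + 1) + 1 by unfold pvCntR; omega,
        List.range'_succ, List.flatMap_cons, List.foldl_append, ih, pvAc2_eq]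
  | case2 r2 best h =>
    rw [show pvCntR mr rows r1 r2 = 0 by unfold pvCntR; omega]
    rfl

lemma pvAc1_eq (mr mc : Int) (rows cols : Nat) (p : List (List Int)) (r1 c1 : Nat) (best : Int) :
    pvAc1 mr mc rows cols p r1 c1 best
      = List.foldl max best ((List.range' c1 (cols + 1 - c1)).flatMap
          (fun c1' => (List.range' r1 (pvCntR mr rows r1 r1)).flatMap
            (fun r2' => (List.range' c1' (pvCntC mc cols c1' c1')).map (pvValA p r1 c1' r2')))) := by
  fun_induction pvAc1 mr mc rows cols p r1 c1 best with
  | case1 c1 best h ih =>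
    rw [show cols + 1 - c1 = (cols + 1 - (c1 + 1)) + 1 by omega,
        List.range'_succ, List.flatMap_cons, List.foldl_append, ih, pvAr2_eq]
  | case2 c1 best h =>
    rw [show cols + 1 - c1 = 0 by omega]
    rfl

lemma pvAr1_eq (mr mc : Int) (rows cols : Nat) (p : List (List Int)) (r1 : Nat) (best : Int) :
    pvAr1 mr mc rows cols p r1 best
      = List.foldl max best ((List.range' r1 (rows + 1 - r1)).flatMap
          (fun r1' => (List.range' 1 (cols + 1 - 1)).flatMap
          (fun c1' => (List.range' r1' (pvCntR mr rows r1' r1')).flatMap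
            (fun r2' => (List.range' c1' (pvCntC mc cols c1' c1')).map (pvValA p r1' c1' r2'))))) := by
  fun_induction pvAr1 mr mc rows cols p r1 best with
  | case1 r1 best h ih =>
    rw [show rows + 1 - r1 = (rows + 1 - (r1 + 1)) + 1 by omega,
        List.range'_succ, List.flatMap_cons, List.foldl_append, ih, pvAc1_eq]
  | case2 r1 best h =>
    rw [show rows + 1 - r1 = 0 by omega]
    rfl

lemma pvFoldFlat {α : Type} (L : α → List Int) (xs : List α) (best : Int) :
    xs.foldl (fun b x => (L x).foldl max b) best = (xs.flatMap L).foldl max best := by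
  induction xs generalizing best with
  | nil => rfl
  | cons x xs ih => simp only [List.flatMap_cons, List.foldl_append, List.foldl_cons, ih]

lemma pvBadd_length (row : List Int) (cols : Nat) (strip : List Int) :
    (pvBadd row cols strip).length = strip.length := by
  unfold pvBadd
  induction cols with
  | zero => rfl
  | succ n ih => rw [List.range_succ, List.foldl_append, List.foldl_cons, List.foldl_nil,
                     List.length_set, ih]

lemma pvBadd_getD_ge (row : List Int) (cols : Nat) (strip : List Int) (j : Nat) (hj : cols ≤ j) :
    (pvBadd row cols strip).getD j 0 = strip.getD j 0 := by
  unfold pvBadd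
  induction cols with
  | zero => rfl
  | succ n ih =>
    rw [List.range_succ, List.foldl_append, List.foldl_cons, List.foldl_nil,
        pvGetD_set_ne _ _ _ _ _ (by omega), ih (by omega)]

lemma pvBadd_getD (row : List Int) (cols : Nat) (strip : List Int) (j : Nat)
    (hlen : cols ≤ strip.length) (hj : j < cols) :
    (pvBadd row cols strip).getD j 0 = strip.getD j 0 + row.getD j 0 := by
  induction cols with
  | zero => omega
  | succ n ih =>
    show ((List.range (n+1)).foldl (fun s j => s.set j (s.getD j 0 + row.getD j 0)) strip).getD j 0 = _
    rw [List.range_succ, List.foldl_append, List.foldl_cons, List.foldl_nil]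
    by_cases hn : j = n
    · subst hn
      have hl : j < ((List.range j).foldl (fun s j => s.set j (s.getD j 0 + row.getD j 0)) strip).length := by
        have := pvBadd_length row j strip
        unfold pvBadd at this
        omega
      rw [pvGetD_set_eq _ _ _ _ hl]
      have := pvBadd_getD_ge row j strip j (le_refl j)
      unfold pvBadd at this
      rw [this]
    · rw [pvGetD_set_ne _ _ _ _ _ hn]
      exact ih (by omega) (by omega)

lemma pvBrun_aux (strip : List Int) (l : Nat) (n : Nat) : ∀ (r0 : Nat) (run best : Int), l ≤ r0 →
    run = ∑ j ∈ Finset.Ico l r0, strip.getD j 0 →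
    ((List.range' r0 n).foldl (fun (rb : Int × Int) right =>
        let run' := rb.1 + strip.getD right 0
        (run', if run' > rb.2 then run' else rb.2)) (run, best)).2
      = List.foldl max best ((List.range' r0 n).map (fun r => ∑ j ∈ Finset.Ico l (r+1), strip.getD j 0)) := by
  induction n with
  | zero => intro r0 run best _ _; rfl
  | succ n ih =>
    intro r0 run best hlr hrun
    rw [List.range'_succ, List.foldl_cons, List.map_cons, List.foldl_cons]
    have hstep : run + strip.getD r0 0 = ∑ j ∈ Finset.Ico l (r0 + 1), strip.getD j 0 := by
      rw [Finset.sum_Ico_succ_top hlr, hrun]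
    have hpair : (let run' := (run, best).1 + strip.getD r0 0;
        (run', if run' > (run, best).2 then run' else (run, best).2))
      = ((∑ j ∈ Finset.Ico l (r0 + 1), strip.getD j 0 : Int),
         max best (∑ j ∈ Finset.Ico l (r0 + 1), strip.getD j 0)) := by
      show ((run + strip.getD r0 0), if (run + strip.getD r0 0) > best then (run + strip.getD r0 0) else best) = _
      rw [hstep, pvMaxf]
    rw [hpair]
    exact ih (r0 + 1) _ _ (by omega) rfl

lemma pvBrun_eq (mc : Int) (cols : Nat) (strip : List Int) (l : Nat) (best : Int) :
    pvBrun mc cols strip l best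
      = List.foldl max best ((List.range' l ((min (cols : Int) ((l : Int) + mc) - (l : Int)).toNat)).map
          (fun r => ∑ j ∈ Finset.Ico l (r+1), strip.getD j 0)) := by
  unfold pvBrun
  exact pvBrun_aux strip l _ l 0 best (le_refl l) (by simp)

lemma pvBleft_eq (mc : Int) (cols : Nat) (strip : List Int) (best : Int) :
    pvBleft mc cols strip best
      = List.foldl max best ((List.range cols).flatMap (fun l =>
          (List.range' l ((min (cols : Int) ((l : Int) + mc) - (l : Int)).toNat)).map
            (fun r => ∑ j ∈ Finset.Ico l (r+1), strip.getD j 0))) := by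
  unfold pvBleft
  rw [show (fun (b : Int) left => pvBrun mc cols strip left b)
      = (fun (b : Int) left => ((List.range' left ((min (cols : Int) ((left : Int) + mc) - (left : Int)).toNat)).map
          (fun r => ∑ j ∈ Finset.Ico left (r+1), strip.getD j 0)).foldl max b) by
        funext b left; exact pvBrun_eq mc cols strip left b]
  exact pvFoldFlat _ _ _

lemma pvBbot_aux (m : List (List Int)) (mc : Int) (cols : Nat) (t : Nat) (n : Nat) :
    ∀ (b0 : Nat) (strip : List Int) (best : Int), t ≤ b0 → strip.length = cols →
    (∀ j, j < cols → strip.getD j 0 = ∑ i ∈ Finset.Ico t b0, pvEnt m i j) →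
    ((List.range' b0 n).foldl (fun (sb : List Int × Int) bot =>
        let strip' := pvBadd (m.getD bot []) cols sb.1
        (strip', pvBleft mc cols strip' sb.2)) (strip, best)).2
      = List.foldl max best ((List.range' b0 n).flatMap (fun b =>
          (List.range cols).flatMap (fun l =>
            (List.range' l ((min (cols : Int) ((l : Int) + mc) - (l : Int)).toNat)).map
              (fun r => pvRect m t (b+1) l (r+1))))) := by
  induction n with
  | zero => intro b0 strip best _ _ _; rfl
  | succ n ih =>
    intro b0 strip best htb hlen hstrip
    rw [List.range'_succ, List.foldl_cons, List.flatMap_cons, List.foldl_append]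
    have hlen' : (pvBadd (m.getD b0 []) cols strip).length = cols := by
      rw [pvBadd_length]; exact hlen
    have hstrip' : ∀ j, j < cols →
        (pvBadd (m.getD b0 []) cols strip).getD j 0 = ∑ i ∈ Finset.Ico t (b0+1), pvEnt m i j := by
      intro j hj
      rw [pvBadd_getD _ _ _ _ (by omega) hj, hstrip j hj, Finset.sum_Ico_succ_top htb]
      rfl
    have hleft : pvBleft mc cols (pvBadd (m.getD b0 []) cols strip) best
        = List.foldl max best ((List.range cols).flatMap (fun l =>
            (List.range' l ((min (cols : Int) ((l : Int) + mc) - (l : Int)).toNat)).map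
              (fun r => pvRect m t (b0+1) l (r+1)))) := by
      rw [pvBleft_eq]
      congr 1
      apply List.flatMap_congr
      intro l hl
      apply List.map_congr_left
      intro r hr
      have hlc : l < cols := List.mem_range.mp hl
      have hrc : r < l + ((min (cols : Int) ((l : Int) + mc) - (l : Int)).toNat) := (List.mem_range'_1.mp hr).2
      have hlr : l ≤ r := (List.mem_range'_1.mp hr).1
      rw [Finset.sum_congr rfl (fun j hj => hstrip' j (by
        have := Finset.mem_Ico.mp hj
        omega))]
      rw [pvRect, Finset.sum_comm]
    show (List.foldl _ (pvBadd (m.getD b0 []) cols strip, pvBleft mc cols (pvBadd (m.getD b0 []) cols strip) best) _).2 = _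
    rw [ih (b0 + 1) _ _ (by omega) hlen' hstrip', hleft]

lemma pvA_main (matrix : List (List Int)) (mr mc : Int)
    (h1 : matrix.length ≠ 0) (h2 : (matrix.getD 0 []).length ≠ 0) :
    max_sum_rectangle matrix mr mc
      = List.foldl max ((matrix.getD 0 []).getD 0 0)
          ((List.range' 1 matrix.length).flatMap (fun r1 =>
           (List.range' 1 (matrix.getD 0 []).length).flatMap (fun c1 =>
           (List.range' r1 (pvCntR mr matrix.length r1 r1)).flatMap (fun r2 =>
           (List.range' c1 (pvCntC mc (matrix.getD 0 []).length c1 c1)).map (fun c2 =>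
             pvRect matrix (r1-1) r2 (c1-1) c2))))) := by
  set rows := matrix.length with hR
  set cols := (matrix.getD 0 []).length with hC
  simp only [max_sum_rectangle, if_neg h1, if_neg h2, ← hR, ← hC]
  rw [pvAr1_eq, show rows + 1 - 1 = rows by omega, show cols + 1 - 1 = cols by omega]
  congr 1
  apply List.flatMap_congr
  intro r1 hr1
  apply List.flatMap_congr
  intro c1 hc1
  apply List.flatMap_congr
  intro r2 hr2
  apply List.map_congr_left
  intro c2 hc2
  obtain ⟨hr1a, hr1b⟩ := List.mem_range'_1.mp hr1
  obtain ⟨hc1a, hc1b⟩ := List.mem_range'_1.mp hc1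
  obtain ⟨hr2a, hr2b⟩ := List.mem_range'_1.mp hr2
  obtain ⟨hc2a, hc2b⟩ := List.mem_range'_1.mp hc2
  have hr2r : r2 ≤ rows := by unfold pvCntR at hr2b; omega
  have hc2c : c2 ≤ cols := by unfold pvCntC at hc2b; omega
  unfold pvValA
  rw [pvTable matrix rows cols r2 c2 hr2r hc2c,
      pvTable matrix rows cols (r1-1) c2 (by omega) hc2c,
      pvTable matrix rows cols r2 (c1-1) hr2r (by omega),
      pvTable matrix rows cols (r1-1) (c1-1) (by omega) (by omega),
      pvPre_sub matrix (r1-1) r2 (c1-1) c2 (by omega) (by omega)]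

lemma pvB_main (matrix : List (List Int)) (mr mc : Int)
    (h1 : matrix.length ≠ 0) (h2 : (matrix.getD 0 []).length ≠ 0) :
    max_sum_rectangle_alt matrix mr mc
      = List.foldl max ((matrix.getD 0 []).getD 0 0)
          ((List.range matrix.length).flatMap (fun t =>
           (List.range' t ((min ((matrix.length : Int)) ((t : Int) + mr) - (t : Int)).toNat)).flatMap (fun b =>
           (List.range (matrix.getD 0 []).length).flatMap (fun l =>
           (List.range' l ((min (((matrix.getD 0 []).length : Int)) ((l : Int) + mc) - (l : Int)).toNat)).map (fun r =>
             pvRect matrix t (b+1) l (r+1)))))) := by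
  set rows := matrix.length with hR
  set cols := (matrix.getD 0 []).length with hC
  simp only [max_sum_rectangle_alt, if_neg h1, if_neg h2, ← hR, ← hC]
  have hfun : (fun (b : Int) top => pvBbot matrix mr mc rows cols top b)
      = fun (b : Int) top =>
          ((List.range' top ((min ((rows : Int)) ((top : Int) + mr) - (top : Int)).toNat)).flatMap
            (fun bb => (List.range cols).flatMap
              (fun l => (List.range' l ((min ((cols : Int)) ((l : Int) + mc) - (l : Int)).toNat)).map
                (fun r => pvRect matrix top (bb+1) l (r+1))))).foldl max b := by
    funext b top
    unfold pvBbot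
    exact pvBbot_aux matrix mc cols top _ top (List.replicate cols 0) b (le_refl top)
      (by simp)
      (by intro j hj; rw [pvGetD_replicate, if_pos hj]; simp)
  rw [hfun]
  exact pvFoldFlat _ _ _

lemma pvFlatMapAppend {α γ : Type} (ys : List α) (g h : α → List γ) :
    (ys.flatMap fun y => g y ++ h y).Perm (ys.flatMap g ++ ys.flatMap h) := by
  induction ys with
  | nil => simp
  | cons y ys ih =>
    simp only [List.flatMap_cons, List.append_assoc]
    apply List.Perm.append_left
    refine (List.Perm.append_left (h y) ih).trans ?_
    rw [← List.append_assoc, ← List.append_assoc]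
    exact List.Perm.append_right _ List.perm_append_comm

lemma pvFlatMapSwap {α β γ : Type} (xs : List α) (ys : List β) (f : α → β → List γ) :
    (xs.flatMap fun x => ys.flatMap fun y => f x y).Perm
      (ys.flatMap fun y => xs.flatMap fun x => f x y) := by
  induction xs with
  | nil => simp
  | cons x xs ih =>
    simp only [List.flatMap_cons]
    exact (List.Perm.append_left _ ih).trans (pvFlatMapAppend ys (f x) _).symm

lemma pvCntR_shift (mr : Int) (rows t : Nat) :
    pvCntR mr rows (1 + t) (1 + t) = (min ((rows : Int)) ((t : Int) + mr) - (t : Int)).toNat := by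
  unfold pvCntR; push_cast; omega

lemma pvCntC_shift (mc : Int) (cols l : Nat) :
    pvCntC mc cols (1 + l) (1 + l) = (min ((cols : Int)) ((l : Int) + mc) - (l : Int)).toNat := by
  unfold pvCntC; push_cast; omega

lemma pvRange1 (n : Nat) : List.range' 1 n = (List.range n).map (1 + ·) := by
  rw [List.range_eq_range', List.map_add_range']

lemma pvRangeShift (s n : Nat) : List.range' (1 + s) n = (List.range' s n).map (1 + ·) := by
  rw [List.map_add_range']

theorem pvMainEq (matrix : List (List Int)) (mr mc : Int) :
    max_sum_rectangle matrix mr mc = max_sum_rectangle_alt matrix mr mc := by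
  by_cases h1 : matrix.length = 0
  · simp [max_sum_rectangle, max_sum_rectangle_alt, h1]
  by_cases h2 : (matrix.getD 0 []).length = 0
  · have h2' : matrix[0]?.getD [] = [] := by
      have := List.length_eq_zero_iff.mp h2
      simpa [List.getD] using this
    simp [max_sum_rectangle, max_sum_rectangle_alt, h1, h2']
  rw [pvA_main matrix mr mc h1 h2, pvB_main matrix mr mc h1 h2]
  have hAeq : ((List.range' 1 matrix.length).flatMap (fun r1 =>
           (List.range' 1 (matrix.getD 0 []).length).flatMap (fun c1 =>
           (List.range' r1 (pvCntR mr matrix.length r1 r1)).flatMap (fun r2 =>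
           (List.range' c1 (pvCntC mc (matrix.getD 0 []).length c1 c1)).map (fun c2 =>
             pvRect matrix (r1-1) r2 (c1-1) c2)))))
      = ((List.range matrix.length).flatMap (fun t =>
           (List.range (matrix.getD 0 []).length).flatMap (fun l =>
           (List.range' t ((min ((matrix.length : Int)) ((t : Int) + mr) - (t : Int)).toNat)).flatMap (fun b =>
           (List.range' l ((min (((matrix.getD 0 []).length : Int)) ((l : Int) + mc) - (l : Int)).toNat)).map (fun r =>
             pvRect matrix t (b+1) l (r+1)))))) := by
    simp only [pvRange1, List.flatMap_map]
    apply List.flatMap_congr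
    intro t ht
    apply List.flatMap_congr
    intro l hl
    simp only [pvRangeShift, List.flatMap_map, List.map_map, pvCntR_shift, pvCntC_shift]
    apply List.flatMap_congr
    intro b hb
    apply List.map_congr_left
    intro r hr
    simp only [Function.comp_apply]
    congr 1 <;> omega
  rw [hAeq]
  exact (List.Perm.flatMap_left _ (fun t _ => pvFlatMapSwap _ _ _)).foldl_op_eq


-- ===== VERDICT (by name: the statement is the Claim_ definition above) =====
theorem max_sum_rectangle_spec : Claim_equal_max_sum_rectangle := by
  intro matrix mr mc _ _
  unfold Spec_max_sum_rectangle
  exact pvMainEq matrix mr mc
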